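-- pv_equiv track=rewrite | github.com/liamstewartboyle/expred_web_app | app/faxplain/faxplain_utils.py | machine_rationale_mask_to_html
-- ===== SOURCE A (Python) =====
-- def highlight_exp_pred(exp, doc, highlight='yellow', shorten=True):
--     ret = ''
--     abrcount = 0
--     abrflag = False  # for abbreviation
--     for e, w in zip(exp, doc[0]):
--         if e == 1:
--             if highlight == 'bold':
--                 ret += f'<b class="token">{w}&nbsp;</b>'
--             else:
--                 ret += f'<span style="background-color:#FFFF00; float: left">{w}&nbsp;</span>'
--             abrcount = 0
--             abrflag = False
--         else:
--             if abrflag: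
--                 continue
--             abrcount += 1
--             if abrcount > 4 and shorten:
--                 abrflag = True
--                 ret += f'<span class=“token”>...&nbsp;</span>'
--             else:
--                 ret += f'<span class="token">{w}&nbsp;</span>'
--     return ret
--
-- def color_cls_pred(c,
--                    pos_label='SUPPORTS', pos_color='green',
--                    neg_label='REFUTES', neg_color='red',
--                    default_color='gray'):
--     color = default_color
--     if c == pos_label:
--         color = pos_color
--     elif c == neg_label:
--         color = neg_color
--     return f'<p style="color:{color};">{c}</p>'
--
-- def machine_rationale_mask_to_html(cls_preds, exp_preds, docs_clean, urls):
--     cls_strs = [color_cls_pred(c) for c in cls_preds]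
--     evi_strs = [highlight_exp_pred(exp, doc) for exp, doc in zip(exp_preds, docs_clean)]
--     urls = [url.split('/')[-1] for url in urls]
--     pred = {
--         'clses': cls_strs,
--         'evis': evi_strs,
--         'links': urls
--     }
--     return pred
-- ===== SOURCE B (Python) =====
-- def color_cls_pred(c,
--                    pos_label='SUPPORTS', pos_color='green',
--                    neg_label='REFUTES', neg_color='red',
--                    default_color='gray'):
--     color = {pos_label: pos_color, neg_label: neg_color}.get(c, default_color)
--     return f'<p style="color:{color};">{c}</p>'
--
--
-- def _runs(pairs):
--     """Group the (mask, word) stream into maximal consecutive runs by mask value."""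
--     done = []
--     cur_key, cur_words = None, None
--     for e, w in pairs:
--         k = (e == 1)
--         if cur_words is not None and k == cur_key:
--             cur_words.append(w)
--         else:
--             if cur_words is not None:
--                 done.append((cur_key, cur_words))
--             cur_key, cur_words = k, [w]
--     if cur_words is not None:
--         done.append((cur_key, cur_words))
--     return done
--
--
-- def _render_run(key, words, highlight, shorten):
--     if key:
--         if highlight == 'bold':
--             return ''.join(f'<b class="token">{w}&nbsp;</b>' for w in words)
--         return ''.join(f'<span style="background-color:#FFFF00; float: left">{w}&nbsp;</span>'
--                        for w in words)
--     shown = words[:4] if shorten else words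
--     out = ''.join(f'<span class="token">{w}&nbsp;</span>' for w in shown)
--     if shorten and len(words) > 4:
--         out += '<span class=“token”>...&nbsp;</span>'
--     return out
--
--
-- def highlight_exp_pred(exp, doc, highlight='yellow', shorten=True):
--     return ''.join(_render_run(k, ws, highlight, shorten)
--                    for k, ws in _runs(zip(exp, doc[0])))
--
--
-- def machine_rationale_mask_to_html(cls_preds, exp_preds, docs_clean, urls):
--     return {
--         'clses': [color_cls_pred(c) for c in cls_preds],
--         'evis': [highlight_exp_pred(exp, doc) for exp, doc in zip(exp_preds, docs_clean)],
--         'links': [url.split('/')[-1] for url in urls],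
--     }
-- ===== Notes on version B (the rewrite author's own statement) =====
-- stated objective: alternative
-- what changed: highlight_exp_pred is re-decomposed: instead of one loop threading an abbreviation counter and flag, B first groups the (mask, word) stream into maximal consecutive runs by mask value and then renders each run in one piece (per-token spans for a 1-run; first four plain spans plus at most one '...' span for a 0-run); color_cls_pred picks its color by a dict lookup instead of an if/elif chain; the dict assembly is unchanged.
import Mathlib
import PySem

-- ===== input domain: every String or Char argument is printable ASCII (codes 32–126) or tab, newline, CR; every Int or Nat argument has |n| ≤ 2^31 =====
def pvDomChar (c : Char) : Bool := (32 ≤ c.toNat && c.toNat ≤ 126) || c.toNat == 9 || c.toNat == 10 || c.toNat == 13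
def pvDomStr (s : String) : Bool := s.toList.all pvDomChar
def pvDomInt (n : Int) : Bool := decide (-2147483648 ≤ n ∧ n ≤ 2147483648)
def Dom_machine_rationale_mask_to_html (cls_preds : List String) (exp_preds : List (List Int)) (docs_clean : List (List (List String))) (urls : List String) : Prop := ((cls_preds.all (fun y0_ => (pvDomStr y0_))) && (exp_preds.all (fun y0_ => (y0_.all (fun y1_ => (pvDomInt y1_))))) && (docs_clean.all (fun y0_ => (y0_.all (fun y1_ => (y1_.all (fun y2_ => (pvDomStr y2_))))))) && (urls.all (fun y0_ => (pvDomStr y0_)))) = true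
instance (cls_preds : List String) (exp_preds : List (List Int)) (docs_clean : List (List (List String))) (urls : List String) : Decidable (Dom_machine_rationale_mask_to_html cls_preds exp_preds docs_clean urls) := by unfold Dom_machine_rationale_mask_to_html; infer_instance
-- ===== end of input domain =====

-- B regroups highlight_exp_pred: it first segments the (mask, word) stream into maximal
-- consecutive runs by mask value and then renders each run in one piece (per-token spans for a
-- 1-run; first four plain spans plus at most one '...' span for a 0-run), instead of A's
-- single loop threading an abbreviation counter and flag. Objective: alternative decomposition.

-- ===== PORT A =====
-- loop body of highlight_exp_pred: state = (ret, abrcount, abrflag)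
def pvHepStep (highlight : String) (shorten : Bool)
    (st : String × Int × Bool) (ew : Int × String) : String × Int × Bool :=
  if ew.1 == 1 then
    (st.1 ++ (if highlight == "bold"
        then "<b class=\"token\">" ++ ew.2 ++ "&nbsp;</b>"
        else "<span style=\"background-color:#FFFF00; float: left\">" ++ ew.2 ++ "&nbsp;</span>"),
     0, false)
  else if st.2.2 then st   -- abrflag: continue
  else if 4 < st.2.1 + 1 ∧ shorten = true then
    (st.1 ++ "<span class=“token”>...&nbsp;</span>", st.2.1 + 1, true)
  else
    (st.1 ++ "<span class=\"token\">" ++ ew.2 ++ "&nbsp;</span>", st.2.1 + 1, false)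

-- doc[0] raises IndexError on an empty doc: excluded by Pre_, total here via getD []
def highlight_exp_pred (exp : List Int) (doc : List (List String))
    (highlight : String) (shorten : Bool) : String :=
  ((exp.zip ((PySem.List.pyGet? doc 0).getD [])).foldl (pvHepStep highlight shorten)
    ("", 0, false)).1

def color_cls_pred (c pos_label pos_color neg_label neg_color default_color : String) : String :=
  let color := if c == pos_label then pos_color
    else if c == neg_label then neg_color else default_color
  "<p style=\"color:" ++ color ++ ";\">" ++ c ++ "</p>"

def machine_rationale_mask_to_html (cls_preds : List String) (exp_preds : List (List Int)) (docs_clean : List (List (List String))) (urls : List String) : List (String × List String) :=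
  let cls_strs := cls_preds.map (fun c => color_cls_pred c "SUPPORTS" "green" "REFUTES" "red" "gray")
  let evi_strs := (exp_preds.zip docs_clean).map (fun ed => highlight_exp_pred ed.1 ed.2 "yellow" true)
  let urls2 := urls.map (fun url => (PySem.List.pyGet? ((PySem.Str.split? url "/").getD []) (-1)).getD "")
  [("clses", cls_strs), ("evis", evi_strs), ("links", urls2)]

-- ===== PORT B =====
-- _runs: group the stream into maximal consecutive runs by mask value
-- fold state = (open run, finished runs)
def pvRunStep (st : Option (Bool × List String) × List (Bool × List String)) (ew : Int × String) :
    Option (Bool × List String) × List (Bool × List String) :=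
  let k := ew.1 == 1
  match st.1 with
  | some cur => if k == cur.1 then (some (cur.1, cur.2 ++ [ew.2]), st.2)
                else (some (k, [ew.2]), st.2 ++ [cur])
  | none => (some (k, [ew.2]), st.2)

def pvRuns (pairs : List (Int × String)) : List (Bool × List String) :=
  let st := pairs.foldl pvRunStep (none, [])
  match st.1 with
  | some cur => st.2 ++ [cur]
  | none => st.2

-- _render_run
def pvRenderRun (highlight : String) (shorten : Bool) (key : Bool) (words : List String) : String :=
  if key then
    if highlight == "bold" then
      PySem.Str.join "" (words.map (fun w => "<b class=\"token\">" ++ w ++ "&nbsp;</b>"))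
    else
      PySem.Str.join "" (words.map (fun w =>
        "<span style=\"background-color:#FFFF00; float: left\">" ++ w ++ "&nbsp;</span>"))
  else
    (PySem.Str.join "" ((if shorten then words.take 4 else words).map (fun w =>
        "<span class=\"token\">" ++ w ++ "&nbsp;</span>")))
      ++ (if shorten = true ∧ 4 < words.length then "<span class=“token”>...&nbsp;</span>" else "")

def highlight_exp_pred_alt (exp : List Int) (doc : List (List String))
    (highlight : String) (shorten : Bool) : String :=
  PySem.Str.join "" ((pvRuns (exp.zip ((PySem.List.pyGet? doc 0).getD []))).map
    (fun r => pvRenderRun highlight shorten r.1 r.2))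

def color_cls_pred_alt (c pos_label pos_color neg_label neg_color default_color : String) : String :=
  let d : PySem.Dict String String :=
    PySem.Dict.insert (PySem.Dict.insert PySem.Dict.empty pos_label pos_color) neg_label neg_color
  let color := (PySem.Dict.get? d c).getD default_color
  "<p style=\"color:" ++ color ++ ";\">" ++ c ++ "</p>"

def machine_rationale_mask_to_html_alt (cls_preds : List String) (exp_preds : List (List Int)) (docs_clean : List (List (List String))) (urls : List String) : List (String × List String) :=
  [("clses", cls_preds.map (fun c => color_cls_pred_alt c "SUPPORTS" "green" "REFUTES" "red" "gray")),
   ("evis", (exp_preds.zip docs_clean).map (fun ed => highlight_exp_pred_alt ed.1 ed.2 "yellow" true)),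
   ("links", urls.map (fun url => (PySem.List.pyGet? ((PySem.Str.split? url "/").getD []) (-1)).getD ""))]

-- ===== PRECONDITION & SPEC =====
-- Pre_ excludes exactly the inputs where Python A raises IndexError: an empty doc (doc[0])
-- among the docs actually paired with an exp_pred by zip.
def Pre_machine_rationale_mask_to_html (_cls_preds : List String) (exp_preds : List (List Int)) (docs_clean : List (List (List String))) (_urls : List String) : Prop :=
  ∀ d ∈ docs_clean.take exp_preds.length, d ≠ []
instance (cls_preds : List String) (exp_preds : List (List Int)) (docs_clean : List (List (List String))) (urls : List String) : Decidable (Pre_machine_rationale_mask_to_html cls_preds exp_preds docs_clean urls) := by unfold Pre_machine_rationale_mask_to_html; infer_instance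

def pvWitness_machine_rationale_mask_to_html : List String × List (List Int) × List (List (List String)) × List String :=
  (["SUPPORTS", "nope"], [[1, 0, 0, 0, 0, 0, 0, 1]], [[["a", "b", "c", "d", "e", "f", "g", "h"]]], ["http://x/y.html"])

def Spec_machine_rationale_mask_to_html (cls_preds : List String) (exp_preds : List (List Int)) (docs_clean : List (List (List String))) (urls : List String) (out : List (String × List String)) : Prop := out = machine_rationale_mask_to_html_alt cls_preds exp_preds docs_clean urls
instance (cls_preds : List String) (exp_preds : List (List Int)) (docs_clean : List (List (List String))) (urls : List String) (out : List (String × List String)) : Decidable (Spec_machine_rationale_mask_to_html cls_preds exp_preds docs_clean urls out) := by unfold Spec_machine_rationale_mask_to_html; infer_instance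

-- ===== CLAIM (what is proved, stated in full; the proofs are below) =====
def Claim_equal_machine_rationale_mask_to_html : Prop := ∀ (cls_preds : List String) (exp_preds : List (List Int)) (docs_clean : List (List (List String))) (urls : List String), Dom_machine_rationale_mask_to_html cls_preds exp_preds docs_clean urls → Pre_machine_rationale_mask_to_html cls_preds exp_preds docs_clean urls → Spec_machine_rationale_mask_to_html cls_preds exp_preds docs_clean urls (machine_rationale_mask_to_html cls_preds exp_preds docs_clean urls)

-- ===== LEMMAS AND PROOFS =====

-- proof-side views of B's fold state
def pvFinish (st : Option (Bool × List String) × List (Bool × List String)) : List (Bool × List String) :=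
  match st.1 with
  | some cur => st.2 ++ [cur]
  | none => st.2

def pvPartial (cur : Option (Bool × List String)) : String :=
  match cur with
  | some c => pvRenderRun "yellow" true c.1 c.2
  | none => ""

def pvCnt : Option (Bool × List String) → Int
  | some (false, ws) => min (ws.length : Int) 5
  | _ => 0

def pvFlg : Option (Bool × List String) → Bool
  | some (false, ws) => decide (4 < ws.length)
  | _ => false

def pvJoinRuns (rs : List (Bool × List String)) : String :=
  PySem.Str.join "" (rs.map (fun r => pvRenderRun "yellow" true r.1 r.2))

theorem pvJoin_cons (a : String) (l : List String) :
    PySem.Str.join "" (a :: l) = a ++ PySem.Str.join "" l := by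
  apply String.toList_inj.mp
  simp only [PySem.Str.toList_join, PySem.Chars.join, List.intercalate, String.toList_append,
    List.map_cons]
  cases l <;> simp

theorem pvJoin_append_singleton (l : List String) (s : String) :
    PySem.Str.join "" (l ++ [s]) = PySem.Str.join "" l ++ s := by
  induction l with
  | nil => apply String.toList_inj.mp; simp [pvJoin_cons, PySem.Str.toList_join, PySem.Chars.join, List.intercalate]
  | cons a t ih => simp only [List.cons_append, pvJoin_cons, ih, String.append_assoc]

theorem pvJoinRuns_append_singleton (rs : List (Bool × List String)) (r : Bool × List String) :
    pvJoinRuns (rs ++ [r]) = pvJoinRuns rs ++ pvRenderRun "yellow" true r.1 r.2 := by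
  simp only [pvJoinRuns, List.map_append, List.map_cons, List.map_nil, pvJoin_append_singleton]

-- one loop step of A in terms of B's run state
theorem pvJoin_nil : PySem.Str.join "" ([] : List String) = "" := by decide

theorem pvStep (cur : Option (Bool × List String)) (done : List (Bool × List String))
    (e : Int) (w : String) :
    pvHepStep "yellow" true (pvJoinRuns done ++ pvPartial cur, pvCnt cur, pvFlg cur) (e, w)
      = (pvJoinRuns (pvRunStep (cur, done) (e, w)).2 ++ pvPartial (pvRunStep (cur, done) (e, w)).1,
         pvCnt (pvRunStep (cur, done) (e, w)).1, pvFlg (pvRunStep (cur, done) (e, w)).1) := by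
  rcases cur with _ | ⟨k, ws⟩
  · by_cases he : e = 1
    · subst he
      simp [pvHepStep, pvRunStep, pvPartial, pvCnt, pvFlg, pvRenderRun, pvJoin_cons,
        pvJoin_nil, String.append_assoc]
    · have hb : (e == 1) = false := by simp [he]
      simp [pvHepStep, pvRunStep, hb, pvPartial, pvCnt, pvFlg, pvRenderRun, pvJoin_cons,
        pvJoin_nil, String.append_assoc]
  · rcases k with _ | _
    · -- current run is a 0-run
      by_cases he : e = 1
      · subst he
        simp [pvHepStep, pvRunStep, pvPartial, pvCnt, pvFlg, pvRenderRun, pvJoin_cons,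
          pvJoin_nil, pvJoinRuns_append_singleton, String.append_assoc]
      · have hb : (e == 1) = false := by simp [he]
        by_cases h4 : 4 < ws.length
        · -- abrflag is set: A skips, B extends the run without changing its rendering
          have ht : (ws ++ [w]).take 4 = ws.take 4 :=
            List.take_append_of_le_length (by omega)
          have hm : min ((ws.length : Int)) 5 = min (((ws ++ [w]).length : Int)) 5 := by
            simp; omega
          simp [pvHepStep, pvRunStep, hb, pvPartial, pvCnt, pvFlg, pvRenderRun, h4, ht, hm,
            String.append_assoc]
          omega
        · by_cases hlen : ws.length = 4
          · -- fifth plain token: A emits the '...' span, B's run rendering gains it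
            have ht : (ws ++ [w]).take 4 = ws := by
              rw [List.take_append_of_le_length (by omega), List.take_of_length_le (by omega)]
            have hw : ws.take 4 = ws := List.take_of_length_le (by omega)
            have h4le : 4 ≤ ws.length := by omega
            simp [pvHepStep, pvRunStep, hb, pvPartial, pvCnt, pvFlg, pvRenderRun, hlen, ht,
              hw, String.append_assoc]
          · -- still within the first four plain tokens
            have ht : (ws ++ [w]).take 4 = ws ++ [w] :=
              List.take_of_length_le (by simp; omega)
            have hw : ws.take 4 = ws := List.take_of_length_le (by omega)
            have h5 : ¬ 4 ≤ ws.length := by omega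
            simp [pvHepStep, pvRunStep, hb, pvPartial, pvCnt, pvFlg, pvRenderRun, h4, h5, ht, hw,
              pvJoin_append_singleton, String.append_assoc]
            omega
    · -- current run is a 1-run
      by_cases he : e = 1
      · subst he
        simp [pvHepStep, pvRunStep, pvPartial, pvCnt, pvFlg, pvRenderRun,
          pvJoin_append_singleton, String.append_assoc]
      · have hb : (e == 1) = false := by simp [he]
        simp [pvHepStep, pvRunStep, hb, pvPartial, pvCnt, pvFlg, pvRenderRun, pvJoin_cons,
          pvJoin_nil, pvJoinRuns_append_singleton, String.append_assoc]

-- A's loop from any reachable state computes B's join over the finished grouping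
theorem pvInv (pairs : List (Int × String)) :
    ∀ (cur : Option (Bool × List String)) (done : List (Bool × List String)),
    (pairs.foldl (pvHepStep "yellow" true) (pvJoinRuns done ++ pvPartial cur, pvCnt cur, pvFlg cur)).1
      = pvJoinRuns (pvFinish (pairs.foldl pvRunStep (cur, done))) := by
  induction pairs with
  | nil =>
    intro cur done
    cases cur with
    | none => simp [pvFinish, pvPartial]
    | some c => simp [pvFinish, pvPartial, pvJoinRuns_append_singleton]
  | cons p t ih =>
    intro cur done
    obtain ⟨e, w⟩ := p
    simp only [List.foldl_cons, pvStep cur done e w]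
    exact ih (pvRunStep (cur, done) (e, w)).1 (pvRunStep (cur, done) (e, w)).2

theorem pvHep_eq (exp : List Int) (doc : List (List String)) :
    highlight_exp_pred exp doc "yellow" true = highlight_exp_pred_alt exp doc "yellow" true := by
  have h := pvInv (exp.zip ((PySem.List.pyGet? doc 0).getD [])) none []
  simp only [pvPartial, pvCnt, pvFlg, pvJoinRuns, List.map_nil, pvJoin_nil,
    String.append_empty] at h
  unfold highlight_exp_pred highlight_exp_pred_alt
  rw [h]
  rfl

-- ===== VERDICT (by name: the statement is the Claim_ definition above) =====
theorem machine_rationale_mask_to_html_spec : Claim_equal_machine_rationale_mask_to_html := by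
  intro cls_preds exp_preds docs_clean urls _hdom _hpre
  unfold Spec_machine_rationale_mask_to_html
  unfold machine_rationale_mask_to_html machine_rationale_mask_to_html_alt
  have hcls : (fun c => color_cls_pred c "SUPPORTS" "green" "REFUTES" "red" "gray")
      = (fun c => color_cls_pred_alt c "SUPPORTS" "green" "REFUTES" "red" "gray") := by
    funext c
    by_cases h1 : c = "SUPPORTS"
    · by_cases h2 : c = "REFUTES"
      · rw [h1] at h2; simp at h2
      · subst h1
        simp [color_cls_pred, color_cls_pred_alt, PySem.Dict.get?_insert_of_ne, PySem.Dict.get?_insert_self]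
    · by_cases h2 : c = "REFUTES"
      · subst h2
        simp [color_cls_pred, color_cls_pred_alt, PySem.Dict.get?_insert_self]
      · simp [color_cls_pred, color_cls_pred_alt, PySem.Dict.get?_insert_of_ne _ _ h2,
          PySem.Dict.get?_insert_of_ne _ _ h1, PySem.Dict.get?_empty, h1, h2]
  have hevi : (fun (ed : List Int × List (List String)) => highlight_exp_pred ed.1 ed.2 "yellow" true)
      = (fun ed => highlight_exp_pred_alt ed.1 ed.2 "yellow" true) := by
    funext ed; exact pvHep_eq ed.1 ed.2
  simp only [hcls, hevi]
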